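-- pv_equiv track=rewrite | github.com/zxl7/quant-review | daily_review/metrics/zt_analysis.py | _dedupe_tags
-- ===== SOURCE A (Python) =====
-- from typing import Any, Dict, Iterable, List, Tuple
--
-- def _tag_cls_rank(cls: Any) -> int:
--     text = str(cls or "")
--     if "ladder-chip-strong" in text or "red-text" in text:
--         return 3
--     if "ladder-chip-warn" in text or "orange-text" in text:
--         return 2
--     if "ladder-chip-cool" in text or "muted-text" in text or "blue-text" in text:
--         return 1
--     return 0
--
-- def _dedupe_tags(tags: List[Dict[str, str]]) -> List[Dict[str, str]]:
--     seen: Dict[str, int] = {}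
--     out: List[Dict[str, str]] = []
--     for tag in tags:
--         if not isinstance(tag, dict):
--             continue
--         text = str(tag.get("text") or "").strip()
--         if not text:
--             continue
--         item = {"text": text, "cls": str(tag.get("cls") or "")}
--         if text not in seen:
--             seen[text] = len(out)
--             out.append(item)
--             continue
--         idx = seen[text]
--         if _tag_cls_rank(item.get("cls")) > _tag_cls_rank(out[idx].get("cls")):
--             out[idx] = item
--     return out
-- ===== SOURCE B (Python) =====
-- from typing import Any, Dict, List
--
-- def _tag_cls_rank(cls: Any) -> int:
--     text = str(cls or "")
--     if "ladder-chip-strong" in text or "red-text" in text: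
--         return 3
--     if "ladder-chip-warn" in text or "orange-text" in text:
--         return 2
--     if "ladder-chip-cool" in text or "muted-text" in text or "blue-text" in text:
--         return 1
--     return 0
--
-- def _dedupe_tags(tags: List[Dict[str, str]]) -> List[Dict[str, str]]:
--     # Stage 1: group the valid normalized items by text (insertion order of texts).
--     groups: Dict[str, List[Dict[str, str]]] = {}
--     for tag in tags:
--         if not isinstance(tag, dict):
--             continue
--         text = str(tag.get("text") or "").strip()
--         if not text:
--             continue
--         groups.setdefault(text, []).append(
--             {"text": text, "cls": str(tag.get("cls") or "")}
--         )
--     # Stage 2: per group, keep the first item of maximal class rank.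
--     return [max(g, key=lambda it: _tag_cls_rank(it["cls"])) for g in groups.values()]
-- ===== Notes on version B (the rewrite author's own statement) =====
-- stated objective: alternative
-- what changed: Replaced A's single pass that maintains a parallel out-list plus text-to-index dict with in-place replacement by a two-stage pipeline: group the normalized items by text (setdefault/append), then select per group the first item of maximal class rank with max(key=rank).
import Mathlib
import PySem

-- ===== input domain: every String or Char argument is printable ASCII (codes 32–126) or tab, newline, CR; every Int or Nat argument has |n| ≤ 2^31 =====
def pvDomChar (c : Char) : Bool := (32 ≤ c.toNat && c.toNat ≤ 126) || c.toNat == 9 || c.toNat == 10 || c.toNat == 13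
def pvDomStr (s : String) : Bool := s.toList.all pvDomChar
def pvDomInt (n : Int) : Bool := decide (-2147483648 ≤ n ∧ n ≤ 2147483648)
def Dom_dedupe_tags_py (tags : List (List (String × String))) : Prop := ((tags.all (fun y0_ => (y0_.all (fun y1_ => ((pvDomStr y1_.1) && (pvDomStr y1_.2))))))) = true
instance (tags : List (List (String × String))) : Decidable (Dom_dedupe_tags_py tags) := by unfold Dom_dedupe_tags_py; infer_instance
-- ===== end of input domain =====

-- B replaces A's single pass (parallel out-list + text→index dict with in-place replacement)
-- by two stages: group the normalized items by text, then select per group the first item of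
-- maximal class rank (objective: alternative decomposition, same asymptotic cost).

-- ===== PORT A =====
-- str(cls or ""): cls is already a String here (a missing/None value was already turned into "")
def tag_cls_rank_py (cls : String) : Int :=
  if PySem.Str.isIn "ladder-chip-strong" cls || PySem.Str.isIn "red-text" cls then 3
  else if PySem.Str.isIn "ladder-chip-warn" cls || PySem.Str.isIn "orange-text" cls then 2
  else if PySem.Str.isIn "ladder-chip-cool" cls || PySem.Str.isIn "muted-text" cls
          || PySem.Str.isIn "blue-text" cls then 1
  else 0

-- str(tag.get(k) or ""): first-match lookup in the tag dict, "" for a missing key ('or' also maps "" to "")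
def tagGetStr (tag : List (String × String)) (k : String) : String :=
  (PySem.Dict.mk tag).getD k ""

-- one iteration of A's loop; state = (seen, out).  out.getD idx [] is Python's out[idx]:
-- idx is always a valid index there (seen only stores indices of out), so getD is exact.
def dedupe_tags_stepA (st : PySem.Dict String Nat × List (List (String × String)))
    (tag : List (String × String)) : PySem.Dict String Nat × List (List (String × String)) :=
  let text := PySem.Str.strip (tagGetStr tag "text")
  if text = "" then st
  else
    let item : List (String × String) := [("text", text), ("cls", tagGetStr tag "cls")]
    match st.1.get? text with
    | none => (st.1.insert text st.2.length, st.2 ++ [item])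
    | some idx =>
      if tag_cls_rank_py ((PySem.Dict.mk item).getD "cls" "")
           > tag_cls_rank_py ((PySem.Dict.mk (st.2.getD idx [])).getD "cls" "") then
        (st.1, st.2.set idx item)
      else st

def dedupe_tags_py (tags : List (List (String × String))) : List (List (String × String)) :=
  (tags.foldl dedupe_tags_stepA (PySem.Dict.empty, [])).2

-- ===== PORT B =====
-- the comprehension's key function: _tag_cls_rank(it["cls"]); every stored item has a "cls" key
def dedupe_tags_rank_key (it : List (String × String)) : Int :=
  tag_cls_rank_py ((PySem.Dict.mk it).getD "cls" "")

-- stage-1 loop body: groups.setdefault(text, []).append(item)  =  modify text [] (· ++ [item])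
def dedupe_tags_stepB (groups : PySem.Dict String (List (List (String × String))))
    (tag : List (String × String)) : PySem.Dict String (List (List (String × String))) :=
  let text := PySem.Str.strip (tagGetStr tag "text")
  if text = "" then groups
  else
    groups.modify text [] (· ++ [[("text", text), ("cls", tagGetStr tag "cls")]])

def dedupe_tags_py_alt (tags : List (List (String × String))) : List (List (String × String)) :=
  let groups := tags.foldl dedupe_tags_stepB PySem.Dict.empty
  -- max(g, key=…) → PySem.List.max? (first maximal); every group is nonempty, so getD [] is never used
  groups.values.map (fun g => (PySem.List.max? g dedupe_tags_rank_key).getD [])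

-- ===== PRECONDITION & SPEC =====
def Spec_dedupe_tags_py (tags : List (List (String × String))) (out : List (List (String × String))) : Prop := out = dedupe_tags_py_alt tags
instance (tags : List (List (String × String))) (out : List (List (String × String))) : Decidable (Spec_dedupe_tags_py tags out) := by unfold Spec_dedupe_tags_py; infer_instance

-- ===== CLAIM (what is proved, stated in full; the proofs are below) =====
def Claim_equal_dedupe_tags_py : Prop := ∀ (tags : List (List (String × String))), Dom_dedupe_tags_py tags → Spec_dedupe_tags_py tags (dedupe_tags_py tags)

-- ===== LEMMAS AND PROOFS =====

-- the first item of maximal rank in a group (B's per-group selection)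
def fmx (g : List (List (String × String))) : List (String × String) :=
  (PySem.List.max? g dedupe_tags_rank_key).getD []

lemma fmx_singleton (x : List (String × String)) : fmx [x] = x := rfl

lemma fmx_append_singleton (g : List (List (String × String))) (hg : g ≠ [])
    (x : List (String × String)) :
    fmx (g ++ [x]) =
      if dedupe_tags_rank_key (fmx g) < dedupe_tags_rank_key x then x else fmx g := by
  have hnn : PySem.List.max? g dedupe_tags_rank_key ≠ none :=
    fun h => hg ((PySem.List.max?_eq_none_iff g dedupe_tags_rank_key).mp h)
  obtain ⟨m, hm⟩ := Option.ne_none_iff_exists'.mp hnn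
  simp only [fmx, PySem.List.max?, List.foldl_append] at *
  rw [hm]
  split <;> rename_i h <;> simp only [Option.getD_some] at h ⊢ <;> simp [h]

-- the two lookups, characterised together over the ghost group list G
lemma both_get? (G : List (String × List (List (String × String)))) (t : String) : ∀ (n : Nat),
    ((PySem.Dict.mk ((G.map Prod.fst).zipIdx n)).get? t = none ∧ (PySem.Dict.mk G).get? t = none)
    ∨ ∃ i, ∃ hi : i < G.length, G[i].1 = t ∧
        (PySem.Dict.mk ((G.map Prod.fst).zipIdx n)).get? t = some (i + n) ∧
        (PySem.Dict.mk G).get? t = some G[i].2 := by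
  induction G with
  | nil => intro n; exact Or.inl ⟨rfl, rfl⟩
  | cons p rest ih =>
    obtain ⟨k, v⟩ := p
    intro n
    by_cases hk : k = t
    · right
      refine ⟨0, by simp, hk, ?_, ?_⟩ <;>
        simp [PySem.Dict.get?_mk_cons, hk]
    · rcases ih (n + 1) with ⟨h1, h2⟩ | ⟨i, hi, hf, hs, hb⟩
      · left
        constructor <;> simp [PySem.Dict.get?_mk_cons, hk, h1, h2]
      · right
        refine ⟨i + 1, by simpa using Nat.succ_lt_succ hi, by simpa using hf, ?_, ?_⟩
        · rw [show i + 1 + n = i + (n + 1) by omega]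
          simp [PySem.Dict.get?_mk_cons, hk, hs]
        · simp [PySem.Dict.get?_mk_cons, hk, hb]

lemma set_getElem_self {α : Type} (l : List α) (i : Nat) (a : α) (h : i < l.length)
    (he : l[i] = a) : l.set i a = l := by
  apply List.ext_getElem (by simp)
  intro j hj _
  rw [List.getElem_set]
  split <;> simp_all

lemma map_replace_eq_set (G : List (String × List (List (String × String)))) (t : String)
    (v : List (List (String × String))) (hn : (G.map Prod.fst).Nodup) :
    ∀ (i : Nat) (hi : i < G.length), G[i].1 = t →
    G.map (fun p => if p.1 == t then (t, v) else p) = G.set i (t, v) := by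
  induction G with
  | nil => intro i hi; simp at hi
  | cons p rest ih =>
    intro i hi hf
    simp only [List.map_cons, List.nodup_cons, List.mem_map] at hn
    cases i with
    | zero =>
      simp only [List.getElem_cons_zero] at hf
      have hz : ∀ q ∈ rest, (fun p => if p.1 == t then (t, v) else p) q = id q := by
        intro q hq
        have hqt : (q.1 == t) = false := by
          simp only [beq_eq_false_iff_ne, ne_eq]
          exact fun h => hn.1 ⟨q, hq, h.trans hf.symm⟩
        simp [hqt]
      simp only [List.map_cons, List.set_cons_zero, List.map_congr_left hz, List.map_id]
      simp [hf]
    | succ j =>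
      simp only [List.getElem_cons_succ] at hf
      simp only [List.length_cons, Nat.add_lt_add_iff_right] at hi
      have hp : (p.1 == t) = false := by
        simp only [beq_eq_false_iff_ne, ne_eq]
        exact fun h => hn.1 ⟨rest[j], by simp, hf.trans h.symm⟩
      simp only [List.map_cons, List.set_cons_succ, hp, Bool.false_eq_true, if_false,
        ih hn.2 j hi hf]

-- one loop iteration preserves the correspondence: A's state is (indices of G's keys,
-- per-group first-max items) and B's groups dict is exactly G
lemma step_pair (G : List (String × List (List (String × String))))
    (hn : (G.map Prod.fst).Nodup) (hne : ∀ p ∈ G, p.2 ≠ []) (tag : List (String × String)) :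
    ∃ G', (G'.map Prod.fst).Nodup ∧ (∀ p ∈ G', p.2 ≠ []) ∧
      dedupe_tags_stepA (PySem.Dict.mk ((G.map Prod.fst).zipIdx), G.map (fun p => fmx p.2)) tag
        = (PySem.Dict.mk ((G'.map Prod.fst).zipIdx), G'.map (fun p => fmx p.2)) ∧
      dedupe_tags_stepB (PySem.Dict.mk G) tag = PySem.Dict.mk G' := by
  by_cases ht : PySem.Str.strip (tagGetStr tag "text") = ""
  · exact ⟨G, hn, hne, by simp [dedupe_tags_stepA, ht], by simp [dedupe_tags_stepB, ht]⟩
  · rcases both_get? G (PySem.Str.strip (tagGetStr tag "text")) 0 with ⟨hA0, hB0⟩ | ⟨i, hi, hf, hA0, hB0⟩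
    · -- new key: A appends to out, B starts a new singleton group
      have hmem : PySem.Str.strip (tagGetStr tag "text") ∉ G.map Prod.fst := by
        rw [PySem.Dict.get?_eq_none_iff_not_mem_keys] at hB0; simpa using hB0
      have hcA : (PySem.Dict.mk ((G.map Prod.fst).zipIdx)).contains (PySem.Str.strip (tagGetStr tag "text")) = false := by
        rw [PySem.Dict.contains_eq_isSome_get?, hA0]; rfl
      have hcB : (PySem.Dict.mk G).contains (PySem.Str.strip (tagGetStr tag "text")) = false := by
        rw [PySem.Dict.contains_eq_isSome_get?, hB0]; rfl
      have hgd : (PySem.Dict.mk G).getD (PySem.Str.strip (tagGetStr tag "text")) [] = [] := by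
        simp [PySem.Dict.getD, hB0]
      have hnodup : (((G ++ [(PySem.Str.strip (tagGetStr tag "text"),
          [[("text", PySem.Str.strip (tagGetStr tag "text")), ("cls", tagGetStr tag "cls")]])]).map Prod.fst)).Nodup := by
        rw [List.map_append, List.nodup_append]
        refine ⟨hn, by simp, ?_⟩
        intro a ha b hb
        simp only [List.map_cons, List.map_nil, List.mem_singleton] at hb
        exact fun h => hmem ((h.trans hb) ▸ ha)
      refine ⟨G ++ [(PySem.Str.strip (tagGetStr tag "text"),
                [[("text", PySem.Str.strip (tagGetStr tag "text")), ("cls", tagGetStr tag "cls")]])],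
              hnodup, ?_, ?_, ?_⟩
      · intro p hp
        rcases List.mem_append.mp hp with h | h
        · exact hne p h
        · simp only [List.mem_singleton] at h; subst h; simp
      · simp only [dedupe_tags_stepA, ht, if_false, hA0]
        refine Prod.ext ?_ (by simp [fmx_singleton])
        apply PySem.Dict.ext
        rw [PySem.Dict.items_insert_of_not_contains _ _ hcA]
        simp [List.zipIdx_append]
      · simp only [dedupe_tags_stepB, PySem.Dict.modify, ht, if_false, hgd]
        apply PySem.Dict.ext
        rw [PySem.Dict.items_insert_of_not_contains _ _ hcB]
        rfl
    · -- existing key at position i: A conditionally replaces out[i], B appends to group i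
      have hi' : i < (G.map (fun p => fmx p.2)).length := by simpa using hi
      have hifst : (G.map Prod.fst)[i]'(by simpa using hi) = PySem.Str.strip (tagGetStr tag "text") := by
        simpa using hf
      have hcur : (G.map (fun p => fmx p.2)).getD i [] = fmx G[i].2 := by
        rw [List.getD_eq_getElem _ _ hi']
        simp
      have hcB : (PySem.Dict.mk G).contains (PySem.Str.strip (tagGetStr tag "text")) = true := by
        rw [PySem.Dict.contains_eq_isSome_get?, hB0]; rfl
      have hgd : (PySem.Dict.mk G).getD (PySem.Str.strip (tagGetStr tag "text")) [] = G[i].2 := by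
        simp [PySem.Dict.getD, hB0]
      have hGne : G[i].2 ≠ [] := hne _ (List.getElem_mem hi)
      have hfst_eq : ((G.set i (PySem.Str.strip (tagGetStr tag "text"),
          G[i].2 ++ [[("text", PySem.Str.strip (tagGetStr tag "text")), ("cls", tagGetStr tag "cls")]])).map Prod.fst)
          = G.map Prod.fst := by
        rw [List.map_set]
        exact set_getElem_self _ _ _ (by simpa using hi) hifst
      refine ⟨G.set i (PySem.Str.strip (tagGetStr tag "text"),
          G[i].2 ++ [[("text", PySem.Str.strip (tagGetStr tag "text")), ("cls", tagGetStr tag "cls")]]),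
          ?_, ?_, ?_, ?_⟩
      · rw [hfst_eq]; exact hn
      · intro p hp
        rcases List.mem_or_eq_of_mem_set hp with h | h
        · exact hne p h
        · subst h; simp
      · -- A's side
        simp only [dedupe_tags_stepA, ht, if_false, hA0, Nat.add_zero, hcur]
        have hfm := fmx_append_singleton G[i].2 hGne
          [("text", PySem.Str.strip (tagGetStr tag "text")), ("cls", tagGetStr tag "cls")]
        by_cases hr : dedupe_tags_rank_key (fmx G[i].2) < dedupe_tags_rank_key
            [("text", PySem.Str.strip (tagGetStr tag "text")), ("cls", tagGetStr tag "cls")]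
        · rw [if_pos (by simpa [dedupe_tags_rank_key] using hr)]
          refine Prod.ext (by simp only; rw [hfst_eq]) ?_
          simp only [List.map_set, hfm, if_pos hr]
        · rw [if_neg (by simpa [dedupe_tags_rank_key] using hr)]
          refine Prod.ext (by simp only; rw [hfst_eq]) ?_
          simp only [List.map_set, hfm, if_neg hr]
          exact (set_getElem_self _ _ _ (by simpa using hi) (by simp)).symm
      · -- B's side
        simp only [dedupe_tags_stepB, PySem.Dict.modify, ht, if_false, hgd]
        apply PySem.Dict.ext
        rw [PySem.Dict.items_insert_of_contains _ _ hcB]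
        exact map_replace_eq_set G _ _ hn i hi hf

lemma loop_eq (tags : List (List (String × String))) :
    ∀ (G : List (String × List (List (String × String)))), (G.map Prod.fst).Nodup →
    (∀ p ∈ G, p.2 ≠ []) →
    (tags.foldl dedupe_tags_stepA (PySem.Dict.mk ((G.map Prod.fst).zipIdx), G.map (fun p => fmx p.2))).2
      = ((tags.foldl dedupe_tags_stepB (PySem.Dict.mk G)).values).map fmx := by
  induction tags with
  | nil =>
    intro G _ _
    simp [PySem.Dict.values, Function.comp]
  | cons tag rest ih =>
    intro G hn hne
    obtain ⟨G', hn', hne', hA, hB⟩ := step_pair G hn hne tag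
    simp only [List.foldl_cons, hA, hB]
    exact ih G' hn' hne'

-- ===== VERDICT (by name: the statement is the Claim_ definition above) =====
theorem dedupe_tags_py_spec : Claim_equal_dedupe_tags_py := by
  intro tags _
  unfold Spec_dedupe_tags_py dedupe_tags_py dedupe_tags_py_alt
  have := loop_eq tags [] (by simp) (by simp)
  simpa [PySem.Dict.empty, fmx] using this
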